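-- pv_equiv track=rewrite | github.com/Whee99/TravellingSalesmanProblem | tsp.py | parcel_sort
-- ===== SOURCE A (Python) =====
-- def parcel_sort(parcels, optimum_path):
--     parcels_sorted = []
--     for i in range(len(optimum_path)):
--         city_slot = []
--         for j in range(len(parcels)):
--             if optimum_path[i] in parcels[j]:
--                 city_slot.append(parcels[j])
--         parcels_sorted.append(city_slot)
--     return parcels_sorted
-- ===== SOURCE B (Python) =====
-- def parcel_sort(parcels, optimum_path):
--     buckets = {}
--     for p in parcels:
--         for city in dict.fromkeys(p):
--             buckets.setdefault(city, []).append(p)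
--     return [buckets.get(c, []) for c in optimum_path]
-- ===== Notes on version B (the rewrite author's own statement) =====
-- stated objective: alternative
-- what changed: Replaces A's nested scan (for every city in the path, rescan the whole parcel list) with a single grouping pass that buckets parcels by city in a dict, then emits optimum_path's buckets by lookup; fewer scans, but measured wall time was dominated by the result size, so no speed is claimed.
import Mathlib
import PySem

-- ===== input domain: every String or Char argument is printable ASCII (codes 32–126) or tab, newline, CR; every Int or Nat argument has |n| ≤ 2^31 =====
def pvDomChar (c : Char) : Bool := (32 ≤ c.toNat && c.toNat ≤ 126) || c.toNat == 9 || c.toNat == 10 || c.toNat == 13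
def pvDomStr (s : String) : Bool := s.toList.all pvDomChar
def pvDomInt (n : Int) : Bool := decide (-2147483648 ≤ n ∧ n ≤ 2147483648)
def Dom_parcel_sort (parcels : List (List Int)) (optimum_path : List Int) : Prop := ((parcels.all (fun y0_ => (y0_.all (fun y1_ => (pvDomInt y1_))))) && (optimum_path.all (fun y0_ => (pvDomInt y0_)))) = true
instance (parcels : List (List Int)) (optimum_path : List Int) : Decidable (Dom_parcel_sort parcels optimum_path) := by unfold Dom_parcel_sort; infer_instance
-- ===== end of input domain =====

-- B replaces A's nested scan (for each path city, scan all parcels) by one grouping pass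
-- building city->parcels buckets, then a lookup per path city (objective: alternative).

-- ===== PORT A =====
def parcel_sort (parcels : List (List Int)) (optimum_path : List Int) : List (List (List Int)) :=
  (PySem.List.pyRange 0 (PySem.List.len optimum_path)).foldl
    (fun parcels_sorted i =>
      let city_slot := (PySem.List.pyRange 0 (PySem.List.len parcels)).foldl
        (fun city_slot j =>
          if PySem.List.pyGetD optimum_path i 0 ∈ PySem.List.pyGetD parcels j [] then
            city_slot ++ [PySem.List.pyGetD parcels j []]
          else city_slot) []
      parcels_sorted ++ [city_slot]) []

-- ===== PORT B =====
def parcel_sort_alt (parcels : List (List Int)) (optimum_path : List Int) : List (List (List Int)) :=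
  let buckets : PySem.Dict Int (List (List Int)) :=
    parcels.foldl
      (fun d p =>
        (PySem.List.dedup p).foldl
          (fun d city => d.insert city (d.getD city [] ++ [p])) d)
      PySem.Dict.empty
  optimum_path.map (fun c => buckets.getD c [])

-- ===== PRECONDITION & SPEC =====
def Spec_parcel_sort (parcels : List (List Int)) (optimum_path : List Int) (out : List (List (List Int))) : Prop := out = parcel_sort_alt parcels optimum_path
instance (parcels : List (List Int)) (optimum_path : List Int) (out : List (List (List Int))) : Decidable (Spec_parcel_sort parcels optimum_path out) := by unfold Spec_parcel_sort; infer_instance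

-- ===== CLAIM (what is proved, stated in full; the proofs are below) =====
def Claim_equal_parcel_sort : Prop := ∀ (parcels : List (List Int)) (optimum_path : List Int), Dom_parcel_sort parcels optimum_path → Spec_parcel_sort parcels optimum_path (parcel_sort parcels optimum_path)

-- ===== LEMMAS AND PROOFS =====

-- one parcel p pushed into the buckets of its distinct cities
lemma getD_foldl_insert_append (x : List Int) (c : Int)
    (L : List Int) (hL : L.Nodup) (d : PySem.Dict Int (List (List Int))) :
    (L.foldl (fun d city => d.insert city (d.getD city [] ++ [x])) d).getD c [] =
      d.getD c [] ++ (if c ∈ L then [x] else []) := by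
  induction L generalizing d with
  | nil => simp
  | cons a L ih =>
    rcases List.nodup_cons.mp hL with ⟨ha, hL'⟩
    simp only [List.foldl_cons, ih hL']
    by_cases hca : c = a
    · subst hca
      simp [ha]
    · simp [PySem.Dict.getD_insert, hca, List.mem_cons]

-- the buckets dict groups the parcels: a lookup is A's filter
lemma getD_buckets (parcels : List (List Int)) (c : Int) (d : PySem.Dict Int (List (List Int))) :
    (parcels.foldl
        (fun d p => (PySem.List.dedup p).foldl
          (fun d city => d.insert city (d.getD city [] ++ [p])) d) d).getD c [] =
      d.getD c [] ++ parcels.filter (fun p => decide (c ∈ p)) := by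
  induction parcels generalizing d with
  | nil => simp
  | cons p ps ih =>
    simp only [List.foldl_cons, ih]
    rw [getD_foldl_insert_append p c _ (PySem.List.nodup_dedup p) d]
    by_cases hc : c ∈ p
    · simp [hc]
    · simp [hc]

-- ===== VERDICT (by name: the statement is the Claim_ definition above) =====
theorem parcel_sort_spec : Claim_equal_parcel_sort := by
  intro parcels optimum_path _
  unfold Spec_parcel_sort
  have hinner : ∀ c : Int,
      (PySem.List.pyRange 0 (PySem.List.len parcels)).foldl
        (fun city_slot j =>
          if c ∈ PySem.List.pyGetD parcels j [] then
            city_slot ++ [PySem.List.pyGetD parcels j []]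
          else city_slot) [] = parcels.filter (fun p => decide (c ∈ p)) := by
    intro c
    rw [PySem.List.foldl_pyRange_pyGetD parcels []
      (fun city_slot p => if c ∈ p then city_slot ++ [p] else city_slot) [] (le_refl 0)]
    simpa using PySem.List.foldl_append_if (fun p => decide (c ∈ p)) id parcels []
  simp only [parcel_sort, parcel_sort_alt, hinner]
  rw [PySem.List.foldl_pyRange_pyGetD optimum_path 0
    (fun acc c => acc ++ [parcels.filter (fun p => decide (c ∈ p))]) [] (le_refl 0)]
  simp only [Int.toNat_zero, List.drop_zero]
  rw [PySem.List.foldl_append_singleton_eq_map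
    (fun c => parcels.filter (fun p => decide (c ∈ p))) optimum_path []]
  simp only [List.nil_append]
  exact List.map_congr_left fun c _ => by
    rw [getD_buckets]
    simp
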